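-- pv_equiv track=rewrite | github.com/Mramaran/flames_py | flames_final.py | flames
-- ===== SOURCE A (Python) =====
-- def flames(n):
--     flames=['f','l','a','m','e','s']
--     remo=0
--     for i in range(6,1,-1):
--         remo=((remo+n)%i)-1
--         del flames[remo]
--         if remo==-1:
--             remo=0
--     return(flames[0])
-- ===== SOURCE B (Python) =====
-- def flames(n):
--     flames = ['f', 'l', 'a', 'm', 'e', 's']
--     j = 0
--     for k in range(2, 7):
--         j = (j + n) % k
--     return flames[j]
-- ===== Notes on version B (the rewrite author's own statement) =====
-- stated objective: alternative
-- what changed: Replaces the simulate-and-delete elimination loop (mutating the 6-element list) with the closed Josephus survivor recurrence j=(j+n)%k for k=2..6 and a single index lookup on the untouched list.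
import Mathlib
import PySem

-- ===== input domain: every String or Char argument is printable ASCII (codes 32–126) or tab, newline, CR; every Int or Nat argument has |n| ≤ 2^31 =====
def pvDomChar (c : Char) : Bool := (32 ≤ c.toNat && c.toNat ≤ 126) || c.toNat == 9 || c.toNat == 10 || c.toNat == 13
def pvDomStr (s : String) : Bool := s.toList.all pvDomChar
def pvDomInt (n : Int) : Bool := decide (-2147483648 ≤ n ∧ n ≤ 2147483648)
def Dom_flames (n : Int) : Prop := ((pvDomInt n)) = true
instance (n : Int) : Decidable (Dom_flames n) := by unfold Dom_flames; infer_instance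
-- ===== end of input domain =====

-- B replaces A's simulate-and-delete elimination loop by the Josephus survivor recurrence
-- j = (j + n) % k for k = 2..6 and one lookup on the untouched list (objective: alternative).

-- ===== PORT A =====
-- one iteration of A's loop body: state = (current list, remo)
def flamesStep (n : Int) (st : List String × Int) (i : Int) : List String × Int :=
  let remo := PySem.Int.mod (st.2 + n) i - 1
  -- del flames[remo]; remo is always a valid (possibly -1) index here, so pop? is some; [] is unreachable
  let fl := match PySem.List.pop? st.1 remo with
    | some (_, rest) => rest
    | none => []
  (fl, if remo = -1 then 0 else remo)

def flames (n : Int) : String :=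
  let st := (PySem.List.pyRange 6 1 (-1)).foldl (flamesStep n) (["f", "l", "a", "m", "e", "s"], 0)
  -- return flames[0]; the list always has one element left, so pyGet? is some; "" unreachable
  (PySem.List.pyGet? st.1 0).getD ""

-- ===== PORT B =====
def flames_alt (n : Int) : String :=
  let fl := ["f", "l", "a", "m", "e", "s"]
  let j := (PySem.List.pyRange 2 7 1).foldl (fun j k => PySem.Int.mod (j + n) k) 0
  -- fl[j]; j = (... % 6) ∈ [0,5] is always a valid index, so pyGet? is some; "" unreachable
  (PySem.List.pyGet? fl j).getD ""

-- ===== PRECONDITION & SPEC =====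
def Spec_flames (n : Int) (out : String) : Prop := out = flames_alt n
instance (n : Int) (out : String) : Decidable (Spec_flames n out) := by unfold Spec_flames; infer_instance

-- ===== CLAIM (what is proved, stated in full; the proofs are below) =====
def Claim_equal_flames : Prop := ∀ (n : Int), Dom_flames n → Spec_flames n (flames n)

-- ===== LEMMAS AND PROOFS =====

-- both programs only use n through n mod 60 (60 = lcm 2..6)
theorem pymod_add_mod60 (x n i : Int) (h2 : 0 < i) (h60 : i ∣ 60) :
    PySem.Int.mod (x + n) i = PySem.Int.mod (x + n % 60) i := by
  rw [PySem.Int.mod_eq_emod_of_pos h2, PySem.Int.mod_eq_emod_of_pos h2,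
      Int.add_emod x n, Int.add_emod x (n % 60), Int.emod_emod_of_dvd n h60]

theorem flamesStep_mod60 (n : Int) (st : List String × Int) (i : Int)
    (hi : i ∈ PySem.List.pyRange 6 1 (-1)) :
    flamesStep n st i = flamesStep (n % 60) st i := by
  have : i = 6 ∨ i = 5 ∨ i = 4 ∨ i = 3 ∨ i = 2 := by
    rw [PySem.List.mem_pyRange_neg_one] at hi; omega
  unfold flamesStep
  rcases this with h | h | h | h | h <;> subst h <;>
    rw [pymod_add_mod60 st.2 n _ (by omega) (by decide)]

theorem flames_mod60 (n : Int) : flames n = flames (n % 60) := by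
  unfold flames
  exact congrArg (fun st => (PySem.List.pyGet? st.1 0).getD "")
    (PySem.List.foldl_congr_mem _ _ _ _ (fun st i hi => flamesStep_mod60 n st i hi))

theorem altStep_mod60 (n j k : Int) (hk : k ∈ PySem.List.pyRange 2 7 1) :
    PySem.Int.mod (j + n) k = PySem.Int.mod (j + n % 60) k := by
  have : k = 2 ∨ k = 3 ∨ k = 4 ∨ k = 5 ∨ k = 6 := by
    rw [PySem.List.mem_pyRange_one] at hk; omega
  rcases this with h | h | h | h | h <;> subst h <;>
    rw [pymod_add_mod60 j n _ (by omega) (by decide)]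

theorem flames_alt_mod60 (n : Int) : flames_alt n = flames_alt (n % 60) := by
  unfold flames_alt
  exact congrArg (fun j => (PySem.List.pyGet? ["f", "l", "a", "m", "e", "s"] j).getD "")
    (PySem.List.foldl_congr_mem _ _ _ _ (fun j k hk => altStep_mod60 n j k hk))

theorem flames_eq_alt_small : ∀ r : Fin 60, flames (r.1 : Int) = flames_alt (r.1 : Int) := by
  decide

-- ===== VERDICT (by name: the statement is the Claim_ definition above) =====
theorem flames_spec : Claim_equal_flames := by
  intro n _
  unfold Spec_flames
  rw [flames_mod60, flames_alt_mod60]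
  have h0 : 0 ≤ n % 60 := Int.emod_nonneg n (by omega)
  have h1 : n % 60 < 60 := Int.emod_lt_of_pos n (by omega)
  have := flames_eq_alt_small ⟨(n % 60).toNat, by omega⟩
  simpa [Int.toNat_of_nonneg h0] using this
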